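-- pv_equiv track=rewrite | github.com/jonatanskogsfors/aoc2024 | src/aoc2024/day_09.py | defrag_block
-- ===== SOURCE A (Python) =====
-- def defrag_block(file_map, space_map):
--     change = False
--     for index in sorted(file_map, reverse=True):
--         start, length = file_map[index]
--         for space_start in sorted(space_map):
--             space_length = space_map[space_start]
--             if space_start > start:
--                 break
--             if space_length >= length:
--                 file_map[index] = (space_start, length)
--                 space_map.pop(space_start)
--                 space_map[start] = length
--                 if space_length > length:
--                     space_map[space_start + length] = space_length - length
--                 change |= True
--                 break
--     return file_map, space_map, change
-- ===== SOURCE B (Python) =====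
-- def defrag_block(file_map, space_map):
--     change = False
--     for index in sorted(file_map, reverse=True):
--         start, length = file_map[index]
--         fits = [s for s, l in space_map.items() if s <= start and l >= length]
--         if fits:
--             s = min(fits)
--             l = space_map.pop(s)
--             file_map[index] = (s, length)
--             space_map[start] = length
--             if l > length:
--                 space_map[s + length] = l - length
--             change = True
--     return file_map, space_map, change
-- ===== Notes on version B (the rewrite author's own statement) =====
-- stated objective: faster
-- what changed: B replaces A's per-file sort of the space map plus scan-with-break by a single unsorted pass that filters the fitting gap starts and takes their minimum.
import Mathlib
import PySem

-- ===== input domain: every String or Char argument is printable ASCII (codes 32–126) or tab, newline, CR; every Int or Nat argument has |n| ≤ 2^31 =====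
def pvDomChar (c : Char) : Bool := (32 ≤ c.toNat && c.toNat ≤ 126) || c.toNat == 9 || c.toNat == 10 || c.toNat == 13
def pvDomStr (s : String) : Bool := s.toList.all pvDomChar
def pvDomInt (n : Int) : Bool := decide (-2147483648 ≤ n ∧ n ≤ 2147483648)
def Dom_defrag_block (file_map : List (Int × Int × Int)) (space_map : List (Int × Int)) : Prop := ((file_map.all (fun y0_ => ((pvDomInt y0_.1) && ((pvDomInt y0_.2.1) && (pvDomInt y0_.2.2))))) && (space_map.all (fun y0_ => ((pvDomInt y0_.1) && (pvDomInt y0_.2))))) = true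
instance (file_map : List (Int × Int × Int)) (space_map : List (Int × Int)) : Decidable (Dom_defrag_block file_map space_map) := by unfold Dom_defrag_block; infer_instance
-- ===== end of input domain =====

-- B replaces A's sort-then-scan-with-break over the space map (re-sorted for every file)
-- by a single unsorted filter-and-min pass; same results, proved equal on all inputs.
-- Python A mutates its dict arguments in place; the equivalence proved here is about the
-- RETURN value only (B performs the same mutations).

-- ===== PORT A =====
-- inner loop: `for space_start in sorted(space_map): …` with the two breaks
def pvInnerA (index start length : Int) (fd : PySem.Dict Int (Int × Int))
    (sd : PySem.Dict Int Int) (ch : Bool) :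
    List Int → (PySem.Dict Int (Int × Int)) × (PySem.Dict Int Int) × Bool
  | [] => (fd, sd, ch)
  | s :: rest =>
    let sl := sd.getD s 0
    if start < s then (fd, sd, ch)
    else if length ≤ sl then
      let fd' := fd.insert index (s, length)
      let sd' := (sd.erase s).insert start length
      let sd'' := if length < sl then sd'.insert (s + length) (sl - length) else sd'
      (fd', sd'', true)
    else pvInnerA index start length fd sd ch rest

-- outer loop: `for index in sorted(file_map, reverse=True): …`
def pvOuterA (fd : PySem.Dict Int (Int × Int)) (sd : PySem.Dict Int Int) (ch : Bool) :
    List Int → (PySem.Dict Int (Int × Int)) × (PySem.Dict Int Int) × Bool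
  | [] => (fd, sd, ch)
  | i :: rest =>
    let p := fd.getD i (0, 0)
    let r := pvInnerA i p.1 p.2 fd sd ch (PySem.List.sorted sd.keys (fun x => x) false)
    pvOuterA r.1 r.2.1 r.2.2 rest

def defrag_block (file_map : List (Int × Int × Int)) (space_map : List (Int × Int)) :
    (List (Int × Int × Int)) × (List (Int × Int)) × Bool :=
  let fd := PySem.Dict.ofList file_map
  let sd := PySem.Dict.ofList space_map
  let r := pvOuterA fd sd false (PySem.List.sorted fd.keys (fun x => x) true)
  (r.1.items, r.2.1.items, r.2.2)

-- ===== PORT B =====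
-- `fits = [s for s, l in space_map.items() if s <= start and l >= length]`
def pvFitsB (start length : Int) (sd : PySem.Dict Int Int) : List Int :=
  (sd.items.filter (fun p => decide (p.1 ≤ start) && decide (length ≤ p.2))).map (fun p => p.1)

def pvOuterB (fd : PySem.Dict Int (Int × Int)) (sd : PySem.Dict Int Int) (ch : Bool) :
    List Int → (PySem.Dict Int (Int × Int)) × (PySem.Dict Int Int) × Bool
  | [] => (fd, sd, ch)
  | i :: rest =>
    let p := fd.getD i (0, 0)
    match PySem.List.min? (pvFitsB p.1 p.2 sd) (fun x => x) with
    | none => pvOuterB fd sd ch rest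
    | some s =>
      let l := sd.getD s 0         -- `l = space_map.pop(s)`
      let fd' := fd.insert i (s, p.2)
      let sd' := (sd.erase s).insert p.1 p.2
      let sd'' := if p.2 < l then sd'.insert (s + p.2) (l - p.2) else sd'
      pvOuterB fd' sd'' true rest

def defrag_block_alt (file_map : List (Int × Int × Int)) (space_map : List (Int × Int)) :
    (List (Int × Int × Int)) × (List (Int × Int)) × Bool :=
  let fd := PySem.Dict.ofList file_map
  let sd := PySem.Dict.ofList space_map
  let r := pvOuterB fd sd false (PySem.List.sorted fd.keys (fun x => x) true)
  (r.1.items, r.2.1.items, r.2.2)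

-- ===== PRECONDITION & SPEC =====
def Spec_defrag_block (file_map : List (Int × Int × Int)) (space_map : List (Int × Int)) (out : (List (Int × Int × Int)) × (List (Int × Int)) × Bool) : Prop := out = defrag_block_alt file_map space_map
instance (file_map : List (Int × Int × Int)) (space_map : List (Int × Int)) (out : (List (Int × Int × Int)) × (List (Int × Int)) × Bool) : Decidable (Spec_defrag_block file_map space_map out) := by unfold Spec_defrag_block; infer_instance

-- ===== CLAIM (what is proved, stated in full; the proofs are below) =====
def Claim_equal_defrag_block : Prop := ∀ (file_map : List (Int × Int × Int)) (space_map : List (Int × Int)), Dom_defrag_block file_map space_map → Spec_defrag_block file_map space_map (defrag_block file_map space_map)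

-- ===== LEMMAS AND PROOFS =====

theorem keys_erase (d : PySem.Dict Int Int) (k : Int) :
    (d.erase k).keys = d.keys.filter (fun x => !(x == k)) := by
  cases d with
  | mk items =>
      simp only [PySem.Dict.erase, PySem.Dict.keys, List.filter_map]
      rfl

theorem nodup_keys_erase (d : PySem.Dict Int Int) (k : Int)
    (h : d.keys.Nodup) : (d.erase k).keys.Nodup := by
  rw [keys_erase]; exact h.filter _

theorem foldl_min_eq_self (t : List Int) (x : Int) (h : ∀ y ∈ t, x ≤ y) :
    t.foldl min x = x := by
  induction t with
  | nil => rfl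
  | cons a t ih =>
      simp only [List.foldl_cons]
      rw [min_eq_left (h a (by simp))]
      exact ih (fun y hy => h y (by simp [hy]))

theorem min?_id_head (l : List Int) (h : l.Pairwise (· ≤ ·)) :
    PySem.List.min? l (fun x => x) = l.head? := by
  cases l with
  | nil => simp [PySem.List.min?]
  | cons x t =>
      rw [PySem.List.min?_id_cons]
      simp only [List.head?_cons]
      exact congrArg some (foldl_min_eq_self t x (List.pairwise_cons.mp h).1)

theorem min?_id_eq_of_perm (l₁ l₂ : List Int) (h : l₁.Perm l₂) :
    PySem.List.min? l₁ (fun x => x) = PySem.List.min? l₂ (fun x => x) := by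
  cases e1 : PySem.List.min? l₁ (fun x => x) with
  | none =>
      rw [PySem.List.min?_eq_none_iff] at e1
      subst e1
      have h2 : l₂ = [] := List.perm_nil.mp h.symm
      subst h2; rfl
  | some m₁ =>
      cases e2 : PySem.List.min? l₂ (fun x => x) with
      | none =>
          rw [PySem.List.min?_eq_none_iff] at e2
          subst e2
          have h1 : l₁ = [] := List.perm_nil.mp h
          subst h1; simp [PySem.List.min?] at e1
      | some m₂ =>
          have hm1 := PySem.List.min?_mem e1
          have hm2 := PySem.List.min?_mem e2
          have a := PySem.List.min?_isMin e1 m₂ (h.mem_iff.mpr hm2)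
          have b := PySem.List.min?_isMin e2 m₁ (h.mem_iff.mp hm1)
          exact congrArg some (le_antisymm a b)

-- A's inner loop over an ascending key list returns the update at the HEAD of the fitting keys
theorem innerA_char (i start length : Int) (fd : PySem.Dict Int (Int × Int))
    (sd : PySem.Dict Int Int) (ch : Bool) (ks : List Int) (hks : ks.Pairwise (· ≤ ·)) :
    pvInnerA i start length fd sd ch ks =
      match (ks.filter (fun s => decide (s ≤ start) && decide (length ≤ sd.getD s 0))).head? with
      | none => (fd, sd, ch)
      | some s =>
          (fd.insert i (s, length),
           (if length < sd.getD s 0 then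
              ((sd.erase s).insert start length).insert (s + length) (sd.getD s 0 - length)
            else (sd.erase s).insert start length),
           true) := by
  induction ks with
  | nil => simp [pvInnerA]
  | cons s rest ih =>
      rcases List.pairwise_cons.mp hks with ⟨hhead, htail⟩
      by_cases h1 : start < s
      · have hfilter : (s :: rest).filter
            (fun s => decide (s ≤ start) && decide (length ≤ sd.getD s 0)) = [] := by
          rw [List.filter_eq_nil_iff]
          intro a ha
          rcases List.mem_cons.mp ha with rfl | hmem
          · simp; omega
          · have := hhead a hmem
            simp; omega
        simp [pvInnerA, h1, hfilter]
      · by_cases h2 : length ≤ sd.getD s 0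
        · have h1' : s ≤ start := by omega
          simp [pvInnerA, h1, h2, h1']
        · have hstep : (s :: rest).filter
              (fun s => decide (s ≤ start) && decide (length ≤ sd.getD s 0)) =
              rest.filter (fun s => decide (s ≤ start) && decide (length ≤ sd.getD s 0)) := by
            simp [h2]
          rw [hstep, ← ih htail]
          simp [pvInnerA, h1, h2]

-- B's candidate list is the fitting keys of sd (unsorted)
theorem fitsB_eq_filter_keys (start length : Int) (sd : PySem.Dict Int Int)
    (hnd : sd.keys.Nodup) :
    pvFitsB start length sd =
      sd.keys.filter (fun s => decide (s ≤ start) && decide (length ≤ sd.getD s 0)) := by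
  unfold pvFitsB
  rw [PySem.Dict.items_eq_map_keys sd hnd 0]
  rw [List.filter_map, List.map_map]
  have h1 : ((fun (p : Int × Int) => p.1) ∘ fun k => (k, sd.getD k 0)) = fun (k : Int) => k := rfl
  rw [h1, List.map_id']
  rfl

theorem outer_eq (ks : List Int) : ∀ (fd : PySem.Dict Int (Int × Int))
    (sd : PySem.Dict Int Int) (ch : Bool), sd.keys.Nodup →
    pvOuterA fd sd ch ks = pvOuterB fd sd ch ks := by
  induction ks with
  | nil => intro fd sd ch _; rfl
  | cons i rest ih =>
      intro fd sd ch hnd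
      have hsorted : (PySem.List.sorted sd.keys (fun x => x) false).Pairwise (· ≤ ·) :=
        PySem.List.sorted_pairwise sd.keys (fun x => x)
      have hperm : (PySem.List.sorted sd.keys (fun x => x) false).Perm sd.keys :=
        PySem.List.sorted_perm sd.keys (fun x => x) false
      simp only [pvOuterA, pvOuterB]
      rw [innerA_char i (fd.getD i (0, 0)).1 (fd.getD i (0, 0)).2 fd sd ch _ hsorted]
      have hmin : PySem.List.min? (pvFitsB (fd.getD i (0, 0)).1 (fd.getD i (0, 0)).2 sd)
            (fun x => x) =
          ((PySem.List.sorted sd.keys (fun x => x) false).filter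
            (fun s => decide (s ≤ (fd.getD i (0, 0)).1) &&
              decide ((fd.getD i (0, 0)).2 ≤ sd.getD s 0))).head? := by
        rw [fitsB_eq_filter_keys _ _ sd hnd]
        rw [min?_id_eq_of_perm _ _ (List.Perm.filter _ hperm.symm)]
        exact min?_id_head _ (List.Pairwise.filter _ hsorted)
      rw [hmin]
      cases hh : ((PySem.List.sorted sd.keys (fun x => x) false).filter
          (fun s => decide (s ≤ (fd.getD i (0, 0)).1) &&
            decide ((fd.getD i (0, 0)).2 ≤ sd.getD s 0))).head? with
      | none => exact ih fd sd ch hnd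
      | some s =>
          dsimp only
          apply ih
          split_ifs
          · exact PySem.Dict.nodup_keys_insert _ _ _
              (PySem.Dict.nodup_keys_insert _ _ _ (nodup_keys_erase sd s hnd))
          · exact PySem.Dict.nodup_keys_insert _ _ _ (nodup_keys_erase sd s hnd)

-- ===== VERDICT (by name: the statement is the Claim_ definition above) =====
theorem defrag_block_spec : Claim_equal_defrag_block := by
  intro file_map space_map _
  have h := outer_eq
      (PySem.List.sorted (PySem.Dict.ofList (ν := Int × Int) file_map).keys (fun x => x) true)
      (PySem.Dict.ofList file_map) (PySem.Dict.ofList space_map) false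
      (PySem.Dict.nodup_keys_ofList space_map)
  simp only [Spec_defrag_block, defrag_block, defrag_block_alt, h]
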